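-- pv_equiv track=rewrite | github.com/GuaiYiHu/tf-et-assist-opensource | exp_signal_processing.py | inter_miss_point
-- ===== SOURCE A (Python) =====
-- def inter_miss_point(points):
--     for idx, num in enumerate(points):
--         if num == 0:
--             n = idx
--             try:
--                 while points[n] == 0:
--                     n += 1
--                 if idx == 0:
--                     points[idx] = points[n]
--                 else:
--                     points[idx] = int((points[idx - 1] + points[n]) / 2 + 0.5)
--             except:
--                 points[idx] = points[idx - 1]
--     return points
-- ===== SOURCE B (Python) =====
-- def inter_miss_point(points):
--     # One backward pass records, for every index, the value of the first
--     # nonzero at or after it; one forward pass then fills each zero as the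
--     # rounded midpoint of its left neighbour and that next nonzero value
--     # (endpoints copy the single available neighbour). Mutates `points`.
--     n = len(points)
--     nxt = [None] * n
--     nz = None
--     for i in range(n - 1, -1, -1):
--         if points[i] != 0:
--             nz = points[i]
--         nxt[i] = nz
--     for i in range(n):
--         if points[i] == 0:
--             if nxt[i] is not None:
--                 if i == 0:
--                     points[i] = nxt[i]
--                 else:
--                     points[i] = int((points[i - 1] + nxt[i]) / 2 + 0.5)
--             elif i > 0:
--                 points[i] = points[i - 1]
--     return points
-- ===== Notes on version B (the rewrite author's own statement) =====
-- stated objective: alternative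
-- what changed: A rescans forward from each zero to find the next nonzero value (quadratic on long zero runs); B precomputes the next-nonzero value for every index in one backward pass and then fills all zeros in a single forward pass.
import Mathlib
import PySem

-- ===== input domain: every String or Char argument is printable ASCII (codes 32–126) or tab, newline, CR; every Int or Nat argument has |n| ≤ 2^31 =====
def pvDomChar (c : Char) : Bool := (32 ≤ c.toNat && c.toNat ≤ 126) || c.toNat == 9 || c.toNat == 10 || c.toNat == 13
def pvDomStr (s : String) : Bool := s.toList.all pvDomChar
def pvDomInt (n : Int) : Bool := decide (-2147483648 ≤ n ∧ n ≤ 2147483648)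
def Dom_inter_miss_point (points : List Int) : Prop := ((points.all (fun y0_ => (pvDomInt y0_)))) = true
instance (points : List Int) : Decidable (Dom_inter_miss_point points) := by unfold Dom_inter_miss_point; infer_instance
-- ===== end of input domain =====

-- B replaces A's per-zero forward rescan by one backward next-nonzero pass plus one
-- forward fill (a different single-pass strategy; not measured faster on random inputs). Both Pythons
-- mutate `points` in place; the equivalence is about the returned list (= the mutated argument).

-- ===== PORT A =====

-- exact integer model of Python's `int((p + v) / 2 + 0.5)` = truncation toward zero of
-- (p+v+1)/2; exact on this task's domain since |p+v+1| < 2^33 < 2^53 (no float rounding)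
def pvRound (s : Int) : Int :=
  if 0 ≤ s + 1 then (s + 1) / 2 else -((-(s + 1)) / 2)

-- `while points[n] == 0: n += 1` — first index ≥ n holding a nonzero, none = IndexError
def pvScanA (pts : List Int) (n : Nat) : Option Nat :=
  if h : n < pts.length then
    if pts.getD n 0 = 0 then pvScanA pts (n + 1) else some n
  else none
termination_by pts.length - n

-- body of `for idx, num in enumerate(points)` acting on the current (mutated) list
def pvStepA (pts : List Int) (idx : Nat) : List Int :=
  if pts.getD idx 0 = 0 then
    match pvScanA pts idx with
    | some n =>
        if idx = 0 then pts.set idx (pts.getD n 0)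
        else pts.set idx (pvRound (pts.getD (idx - 1) 0 + pts.getD n 0))
    | none =>
        -- except branch: points[idx] = points[idx - 1]; for idx = 0 Python reads points[-1]
        if idx = 0 then pts.set idx (PySem.List.pyGetD pts (-1) 0)
        else pts.set idx (pts.getD (idx - 1) 0)
  else pts

def inter_miss_point (points : List Int) : List Int :=
  (List.range points.length).foldl pvStepA points

-- ===== PORT B =====

-- Source B's backward pass: nxt[i] = value of the first nonzero at or after i (none if absent)
def pvNexts : List Int → List (Option Int)
  | [] => []
  | x :: xs =>
      let rest := pvNexts xs
      (if x ≠ 0 then some x else rest.headD none) :: rest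

-- Source B's forward pass; prev = the already-filled left neighbour (none at index 0);
-- Source B's `int((points[i-1] + nxt[i]) / 2 + 0.5)` is the same pvRound model as in A's port
def pvFill (prev : Option Int) : List Int → List (Option Int) → List Int
  | [], _ => []
  | x :: xs, [] => x :: xs  -- unreachable: pvNexts has the same length as points
  | x :: xs, nx :: nxs =>
      let y :=
        if x = 0 then
          match nx with
          | some v =>
              match prev with
              | none => v
              | some p => pvRound (p + v)
          | none =>
              match prev with
              | some p => p
              | none => x   -- i = 0 and no nonzero anywhere: nothing to fill, keep 0
        else x
      y :: pvFill (some y) xs nxs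

def inter_miss_point_alt (points : List Int) : List Int :=
  pvFill none points (pvNexts points)

-- ===== PRECONDITION & SPEC =====
def Spec_inter_miss_point (points : List Int) (out : List Int) : Prop := out = inter_miss_point_alt points
instance (points : List Int) (out : List Int) : Decidable (Spec_inter_miss_point points out) := by unfold Spec_inter_miss_point; infer_instance

-- ===== CLAIM (what is proved, stated in full; the proofs are below) =====
def Claim_equal_inter_miss_point : Prop := ∀ (points : List Int), Dom_inter_miss_point points → Spec_inter_miss_point points (inter_miss_point points)

-- ===== LEMMAS AND PROOFS =====

theorem pvScanA_stop (pts : List Int) (n : Nat) (h : ¬ n < pts.length) : pvScanA pts n = none := by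
  rw [pvScanA]; simp [h]

theorem pvScanA_go (pts : List Int) (n : Nat) (h : n < pts.length) :
    pvScanA pts n = if pts.getD n 0 = 0 then pvScanA pts (n + 1) else some n := by
  conv_lhs => rw [pvScanA]
  simp [h]

theorem pvScanA_shift (xs : List Int) (x : Int) (n : Nat) :
    pvScanA (x :: xs) (n + 1) = (pvScanA xs n).map (· + 1) := by
  suffices H : ∀ k n, xs.length - n ≤ k → pvScanA (x :: xs) (n + 1) = (pvScanA xs n).map (· + 1) from H _ n le_rfl
  intro k
  induction k with
  | zero =>
    intro n hn
    rw [pvScanA_stop _ _ (by simp; omega), pvScanA_stop _ _ (by omega)]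
    rfl
  | succ k ih =>
    intro n hn
    by_cases h : n < xs.length
    · rw [pvScanA_go _ _ (by simp; omega : n + 1 < (x :: xs).length), pvScanA_go _ _ h]
      have hg : (x :: xs).getD (n + 1) 0 = xs.getD n 0 := by simp [List.getD]
      rw [hg]
      by_cases hz : xs.getD n 0 = 0
      · rw [if_pos hz, if_pos hz]
        exact ih (n + 1) (by omega)
      · rw [if_neg hz, if_neg hz]; rfl
    · rw [pvScanA_stop _ _ (by simp; omega), pvScanA_stop _ _ h]
      rfl

theorem pvScanA_append (done rest : List Int) :
    pvScanA (done ++ rest) done.length = (pvScanA rest 0).map (· + done.length) := by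
  induction done with
  | nil => simp [Option.map_id']
  | cons d ds ih =>
    have h1 : pvScanA (d :: (ds ++ rest)) (ds.length + 1) = (pvScanA (ds ++ rest) ds.length).map (· + 1) :=
      pvScanA_shift _ _ _
    simp only [List.cons_append, List.length_cons, h1, ih, Option.map_map]
    rcases pvScanA rest 0 with _ | m
    · rfl
    · simp only [Option.map_some, Function.comp_apply, Option.some.injEq]
      omega

theorem pvScanA_none_all_zero (rest : List Int) (h : pvScanA rest 0 = none) :
    ∀ x ∈ rest, x = 0 := by
  induction rest with
  | nil => simp
  | cons a as ih =>
    rw [pvScanA_go _ _ (by simp)] at h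
    by_cases hz : a = 0
    · have hz' : (a :: as).getD 0 0 = 0 := by simpa [List.getD] using hz
      rw [if_pos hz', pvScanA_shift] at h
      have h2 : pvScanA as 0 = none := by
        rcases h' : pvScanA as 0 with _ | m
        · rfl
        · rw [h'] at h; simp at h
      intro x hx
      rcases List.mem_cons.mp hx with rfl | hx
      · exact hz
      · exact ih h2 x hx
    · have hz' : ¬ (a :: as).getD 0 0 = 0 := by simpa [List.getD] using hz
      rw [if_neg hz'] at h
      simp at h

theorem pvScanA_zero_heads (rest : List Int) :
    (pvScanA rest 0).map (fun n => rest.getD n 0) = (pvNexts rest).headD none := by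
  induction rest with
  | nil => rw [pvScanA_stop _ _ (by simp)]; rfl
  | cons a as ih =>
    rw [pvScanA_go _ _ (by simp)]
    by_cases hz : a = 0
    · have hz' : (a :: as).getD 0 0 = 0 := by simpa [List.getD] using hz
      rw [if_pos hz', pvScanA_shift]
      have : ((pvScanA as 0).map (· + 1)).map (fun n => (a :: as).getD n 0)
           = (pvScanA as 0).map (fun n => as.getD n 0) := by
        rw [Option.map_map]; rfl
      rw [this, ih]
      simp [pvNexts, hz]
    · have hz' : ¬ (a :: as).getD 0 0 = 0 := by simpa [List.getD] using hz
      rw [if_neg hz']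
      simp [pvNexts, hz, List.getD]

theorem pvSetApp (done : List Int) (x v : Int) (xs : List Int) :
    (done ++ x :: xs).set done.length v = done ++ v :: xs := by
  induction done with
  | nil => rfl
  | cons d ds ih => simp [ih]

theorem pvGetDApp (done : List Int) (x : Int) (xs : List Int) :
    (done ++ x :: xs).getD done.length 0 = x := by
  induction done with
  | nil => rfl
  | cons d ds ih => simpa [List.getD] using ih

theorem pvGetDAppAdd (done : List Int) (m : Nat) (x : Int) (xs : List Int) :
    (done ++ x :: xs).getD (m + done.length) 0 = (x :: xs).getD m 0 := by
  induction done with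
  | nil => rfl
  | cons d ds ih =>
    have h : m + (d :: ds).length = (m + ds.length) + 1 := by simp; omega
    rw [List.cons_append, h, List.getD_cons_succ, ih]

theorem pvGetDLast (done : List Int) (p : Int) (hd : done.getLast? = some p) (l : List Int) :
    (done ++ l).getD (done.length - 1) 0 = p := by
  induction done with
  | nil => simp at hd
  | cons d ds ih =>
    rcases ds with _ | ⟨e, es⟩
    · simp at hd; simp [List.getD, hd]
    · have hd' : (e :: es).getLast? = some p := by simpa using hd
      have := ih hd'
      simpa [List.getD, Nat.succ_sub_one] using this

theorem pvMain (rest : List Int) : ∀ (done : List Int) (prev : Option Int),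
    ((done = [] ∧ prev = none) ∨ ∃ p, prev = some p ∧ done.getLast? = some p) →
    (List.range' done.length rest.length).foldl pvStepA (done ++ rest)
      = done ++ pvFill prev rest (pvNexts rest) := by
  induction rest with
  | nil => intro done prev hp; simp [pvFill]
  | cons x xs ih =>
    intro done prev hp
    rw [List.length_cons, List.range'_succ, List.foldl_cons]
    have hnx : pvNexts (x :: xs) = (if x ≠ 0 then some x else (pvNexts xs).headD none) :: pvNexts xs := rfl
    have hgd : (done ++ x :: xs).getD done.length 0 = x := pvGetDApp done x xs
    by_cases hz : x = 0
    · -- the current element is zero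
      subst hz
      have h0 : ((0 : Int) :: xs).getD 0 0 = 0 := by simp [List.getD]
      have hsc : pvScanA (done ++ (0 : Int) :: xs) done.length = (pvScanA ((0 : Int) :: xs) 0).map (· + done.length) :=
        pvScanA_append done ((0 : Int) :: xs)
      rcases hs : pvScanA ((0 : Int) :: xs) 0 with _ | m
      · -- no nonzero at or after this position: (0 : Int) :: xs is all zeros
        have hall : ∀ z ∈ (0 : Int) :: xs, z = 0 := pvScanA_none_all_zero _ hs
        have hnx0 : (if (0 : Int) ≠ 0 then some (0 : Int) else (pvNexts xs).headD none) = none := by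
          have h2 := pvScanA_zero_heads ((0 : Int) :: xs)
          rw [hs, hnx] at h2
          simpa using h2.symm
        have hh : (pvNexts xs).head?.getD none = none := by
          rcases hq : pvNexts xs with _ | ⟨a, t⟩
          · rfl
          · rw [hq] at hnx0; simp at hnx0; simp [hnx0]
        rcases hp with ⟨hd, hprev⟩ | ⟨p, hprev, hd⟩
        · -- idx = 0: A's except branch reads points[-1], the last of an all-zero list (= 0);
          -- B leaves the 0 in place: same value
          subst hd hprev
          have hlast : PySem.List.pyGetD ((0 : Int) :: xs) (-1) 0 = 0 := by
            rw [PySem.List.pyGetD_neg_one]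
            · exact hall _ (List.getLast_mem _)
            · exact List.cons_ne_nil (0 : Int) xs
          have hstep : pvStepA ([] ++ (0 : Int) :: xs) ([] : List Int).length = [] ++ (0 : Int) :: xs := by
            simp [pvStepA, hs, hlast]
          rw [hstep]
          have h2 := ih ([(0 : Int)]) (some 0) (Or.inr ⟨0, rfl, rfl⟩)
          simp only [List.length_nil, List.length_cons, List.nil_append,
            List.singleton_append, Nat.zero_add] at h2 ⊢
          rw [h2, hnx]
          simp [pvFill, hh]
        · -- idx > 0: except branch copies the previous (already filled) value
          have hdne : done ≠ [] := by intro h; rw [h] at hd; simp at hd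
          have hlen0 : done.length ≠ 0 := by simpa using hdne
          have hstep : pvStepA (done ++ (0 : Int) :: xs) done.length = done ++ p :: xs := by
            simp only [pvStepA]
            rw [if_pos (by rw [hgd]), hsc, hs]
            simp only [Option.map_none]
            rw [if_neg hlen0, pvGetDLast done p hd, pvSetApp]
          rw [hstep]
          have h2 := ih (done ++ [p]) (some p) (Or.inr ⟨p, rfl, by simp⟩)
          simp only [List.length_append, List.length_cons, List.length_nil] at h2 ⊢
          rw [show (done ++ [p]) ++ xs = done ++ p :: xs by simp] at h2
          rw [h2, hnx]
          subst hprev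
          simp [pvFill, hh]
      · -- the scan finds the next nonzero at relative index m; v is its value
        set v := ((0 : Int) :: xs).getD m 0 with hvdef
        have hnx0 : (if (0 : Int) ≠ 0 then some (0 : Int) else (pvNexts xs).headD none) = some v := by
          have h2 := pvScanA_zero_heads ((0 : Int) :: xs)
          rw [hs, hnx] at h2
          simpa using h2.symm
        have hh : (pvNexts xs).head?.getD none = some v := by
          rcases hq : pvNexts xs with _ | ⟨a, t⟩
          · rw [hq] at hnx0; simp at hnx0
          · rw [hq] at hnx0; simp at hnx0; simp [hnx0]
        have hvget : (done ++ (0 : Int) :: xs).getD (m + done.length) 0 = v := pvGetDAppAdd done m (0 : Int) xs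
        rcases hp with ⟨hd, hprev⟩ | ⟨p, hprev, hd⟩
        · -- idx = 0: points[0] becomes the next nonzero value itself
          subst hd hprev
          have hstep : pvStepA ([] ++ (0 : Int) :: xs) ([] : List Int).length = [] ++ v :: xs := by
            simp only [pvStepA, List.nil_append, List.length_nil]
            rw [if_pos h0, hs]
            simp [hvdef]
          rw [hstep]
          have h2 := ih ([v]) (some v) (Or.inr ⟨v, rfl, rfl⟩)
          simp only [List.length_nil, List.length_cons, List.nil_append,
            List.singleton_append, Nat.zero_add] at h2 ⊢
          rw [h2, hnx]
          simp [pvFill, hh]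
        · -- idx > 0: rounded midpoint of the filled left neighbour and v
          have hdne : done ≠ [] := by intro h; rw [h] at hd; simp at hd
          have hlen0 : done.length ≠ 0 := by simpa using hdne
          have hstep : pvStepA (done ++ (0 : Int) :: xs) done.length = done ++ pvRound (p + v) :: xs := by
            simp only [pvStepA]
            rw [if_pos (by rw [hgd]), hsc, hs]
            simp only [Option.map_some]
            rw [if_neg hlen0, pvGetDLast done p hd, hvget, pvSetApp]
          rw [hstep]
          have h2 := ih (done ++ [pvRound (p + v)]) (some (pvRound (p + v))) (Or.inr ⟨_, rfl, by simp⟩)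
          simp only [List.length_append, List.length_cons, List.length_nil] at h2 ⊢
          rw [show (done ++ [pvRound (p + v)]) ++ xs = done ++ pvRound (p + v) :: xs by simp] at h2
          rw [h2, hnx]
          subst hprev
          simp [pvFill, hh]
    · -- nonzero element: the step leaves the list unchanged
      have hstep : pvStepA (done ++ x :: xs) done.length = done ++ x :: xs := by
        simp only [pvStepA]
        rw [if_neg (by rw [hgd]; exact hz)]
      rw [hstep]
      have h2 := ih (done ++ [x]) (some x) (Or.inr ⟨x, rfl, by simp⟩)
      simp only [List.length_append, List.length_cons, List.length_nil] at h2 ⊢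
      rw [show (done ++ [x]) ++ xs = done ++ x :: xs by simp] at h2
      rw [h2, hnx]
      simp [pvFill, hz]

-- ===== VERDICT (by name: the statement is the Claim_ definition above) =====
theorem inter_miss_point_spec : Claim_equal_inter_miss_point := by
  intro points _
  unfold Spec_inter_miss_point inter_miss_point inter_miss_point_alt
  have h := pvMain points [] none (Or.inl ⟨rfl, rfl⟩)
  simpa [List.range_eq_range'] using h
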